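-- pv_equiv track=rewrite | github.com/garden0225/Algorithm | 프로그래머스/unrated/181890. 왼쪽 오른쪽/왼쪽 오른쪽.py | solution
-- ===== SOURCE A (Python) =====
-- def solution(str_list):
--     if  "l" not in str_list and "r" not in str_list:
--         return []
--     for n, i in enumerate(str_list):
--         if i =="l":
--             return str_list[:n]
--         elif i == "r":
--             return str_list[n+1:]
-- ===== SOURCE B (Python) =====
-- def solution(str_list):
--     # Single forward pass with an accumulator: grow the prefix element by
--     # element; an "l" returns the accumulated prefix, an "r" returns what is
--     # left of the iterator; falling off the end returns [].
--     it = iter(str_list)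
--     acc = []
--     for h in it:
--         if h == "l":
--             return acc
--         if h == "r":
--             return list(it)
--         acc.append(h)
--     return []
-- ===== Notes on version B (the rewrite author's own statement) =====
-- stated objective: simpler
-- what changed: Replaced A's membership pre-scan plus enumerate-index-and-slice loop by a single accumulator pass: the prefix is built element by element and returned at 'l', the rest of the iterator is returned at 'r', with no indices, slicing or membership tests.
import Mathlib
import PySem

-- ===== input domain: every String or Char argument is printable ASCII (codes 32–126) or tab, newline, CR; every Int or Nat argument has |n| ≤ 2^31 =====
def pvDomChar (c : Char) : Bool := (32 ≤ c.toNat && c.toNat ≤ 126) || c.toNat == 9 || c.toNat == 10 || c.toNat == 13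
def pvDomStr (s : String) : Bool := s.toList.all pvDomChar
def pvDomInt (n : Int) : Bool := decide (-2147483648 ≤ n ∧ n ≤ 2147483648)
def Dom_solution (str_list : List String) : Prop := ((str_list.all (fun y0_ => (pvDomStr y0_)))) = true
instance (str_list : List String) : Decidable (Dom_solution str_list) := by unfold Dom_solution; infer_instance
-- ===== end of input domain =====

-- B replaces A's membership pre-scan + enumerate-index-and-slice loop by one accumulator pass
-- (prefix built element by element, tail taken from the iterator); same cost, simpler decomposition.
-- ===== PORT A =====
-- the for-loop of A: scans with the running enumerate index n; none = loop fell through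
def solutionLoopA (orig : List String) : Nat → List String → Option (List String)
  | _, [] => none
  | n, i :: rest =>
    if i == "l" then some (orig.take n)
    else if i == "r" then some (orig.drop (n + 1))
    else solutionLoopA orig (n + 1) rest

def solution (str_list : List String) : List String :=
  if ¬ ("l" ∈ str_list) ∧ ¬ ("r" ∈ str_list) then []
  else (solutionLoopA str_list 0 str_list).getD []

-- ===== PORT B =====
-- Source B's loop: acc is the prefix accumulated so far (acc.append h = acc ++ [h]); the
-- remaining iterator is the unconsumed list t
def solutionGoB (acc : List String) : List String → List String
  | [] => []
  | h :: t =>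
    if h == "l" then acc
    else if h == "r" then t
    else solutionGoB (acc ++ [h]) t

def solution_alt (str_list : List String) : List String :=
  solutionGoB [] str_list

-- ===== PRECONDITION & SPEC =====
def Spec_solution (str_list : List String) (out : List String) : Prop := out = solution_alt str_list
instance (str_list : List String) (out : List String) : Decidable (Spec_solution str_list out) := by unfold Spec_solution; infer_instance

-- ===== CLAIM (what is proved, stated in full; the proofs are below) =====
def Claim_equal_solution : Prop := ∀ (str_list : List String), Dom_solution str_list → Spec_solution str_list (solution str_list)

-- ===== LEMMAS AND PROOFS =====

theorem solutionLoopA_getD_eq_goB (orig : List String) : ∀ (rest : List String) (n : Nat),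
    orig.drop n = rest →
    (solutionLoopA orig n rest).getD [] = solutionGoB (orig.take n) rest := by
  intro rest
  induction rest with
  | nil => intro n _; simp [solutionLoopA, solutionGoB]
  | cons h t ih =>
    intro n hdrop
    have hget : orig[n]? = some h := by
      have h0 : (orig.drop n)[0]? = orig[n + 0]? := List.getElem?_drop
      rw [hdrop] at h0; simpa using h0.symm
    have hdrop1 : orig.drop (n + 1) = t := by
      rw [← List.drop_drop, hdrop]; rfl
    have htake : orig.take (n + 1) = orig.take n ++ [h] := by
      rw [List.take_succ, hget]; rfl
    by_cases hl : h = "l"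
    · simp [solutionLoopA, solutionGoB, hl]
    · by_cases hr : h = "r"
      · simp [solutionLoopA, solutionGoB, hr, hdrop1]
      · simp only [solutionLoopA, solutionGoB, beq_iff_eq, hl, hr, if_false]
        rw [ih (n + 1) hdrop1, htake]

theorem solutionGoB_no_marker : ∀ (rest acc : List String),
    ¬ ("l" ∈ rest) → ¬ ("r" ∈ rest) → solutionGoB acc rest = [] := by
  intro rest
  induction rest with
  | nil => intro acc _ _; simp [solutionGoB]
  | cons h t ih =>
    intro acc hl hr
    have h1 : ¬ h = "l" := fun e => hl (by simp [e])
    have h2 : ¬ h = "r" := fun e => hr (by simp [e])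
    simp only [solutionGoB, beq_iff_eq, h1, h2, if_false]
    exact ih _ (fun m => hl (List.mem_cons_of_mem _ m)) (fun m => hr (List.mem_cons_of_mem _ m))

-- ===== VERDICT (by name: the statement is the Claim_ definition above) =====
theorem solution_spec : Claim_equal_solution := by
  intro xs _
  unfold Spec_solution solution solution_alt
  split
  · next hg => exact (solutionGoB_no_marker xs [] hg.1 hg.2).symm
  · have h := solutionLoopA_getD_eq_goB xs xs 0 (by simp)
    simpa using h
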